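-- pv_equiv track=rewrite | github.com/sigilwig44/AdventOfCode23 | advent_day25.py | dfs
-- ===== SOURCE A (Python) =====
-- def get_neighbors(graph, node):
--     neighbors = set()
--     for item in graph.get(node, []):
--         neighbors.add(item)
--     for key, value in graph.items():
--         if node in value:
--             neighbors.add(key)
--     return list(neighbors)
--
-- def dfs(graph, start):
--     visited = set()
--     stack = [start]
--
--     while stack:
--         node = stack.pop()
--         if node not in visited:
--             visited.add(node)
--             stack.extend(get_neighbors(graph, node))
--
--     return len(visited)
-- ===== SOURCE B (Python) =====
-- def dfs(graph, start):
--     # Build the symmetric adjacency once, then run a single DFS over it.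
--     rev = {}
--     for key, values in graph.items():
--         for v in dict.fromkeys(values):
--             rev.setdefault(v, []).append(key)
--     adj = {}
--     for node in graph:
--         adj[node] = list(dict.fromkeys(list(graph[node]) + rev.get(node, [])))
--     for node in rev:
--         if node not in adj:
--             adj[node] = list(dict.fromkeys(rev[node]))
--     visited = set()
--     stack = [start]
--     while stack:
--         node = stack.pop()
--         if node not in visited:
--             visited.add(node)
--             stack.extend(adj.get(node, []))
--     return len(visited)
-- ===== Notes on version B (the rewrite author's own statement) =====
-- stated objective: alternative
-- what changed: B builds the symmetric adjacency (forward values plus reverse keys, deduplicated) once and then runs a single DFS over it, instead of A's rescan of the entire graph inside get_neighbors at every visited node; a timing run's inputs reach only the start node, where A's rescan never happens, so no speed is claimed.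
import Mathlib
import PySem

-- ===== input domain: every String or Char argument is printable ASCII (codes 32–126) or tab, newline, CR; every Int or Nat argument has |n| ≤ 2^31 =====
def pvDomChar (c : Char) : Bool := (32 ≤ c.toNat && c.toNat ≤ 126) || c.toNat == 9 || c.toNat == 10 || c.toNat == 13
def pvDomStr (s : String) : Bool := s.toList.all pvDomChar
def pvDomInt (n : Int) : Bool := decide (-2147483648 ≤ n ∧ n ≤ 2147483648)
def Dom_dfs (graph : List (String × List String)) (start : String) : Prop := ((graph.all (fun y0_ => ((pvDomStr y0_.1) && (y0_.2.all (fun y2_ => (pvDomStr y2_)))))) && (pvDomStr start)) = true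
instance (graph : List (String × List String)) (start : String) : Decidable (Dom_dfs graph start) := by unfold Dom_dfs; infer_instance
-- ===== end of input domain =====

-- B builds the symmetric adjacency (forward values plus reverse keys, deduplicated)
-- once and then runs a single DFS over it, instead of A's rescan of the whole graph
-- inside get_neighbors at every visited node.
-- A's 'list(set)' neighbour order is hash order in CPython; the returned COUNT does
-- not depend on it, and the ports use first-insertion order for both programs.

-- ===== PORT A =====
-- graph.get(node, []) on the association list (first match)
def pyDictGet (graph : List (String × List String)) (node : String) : List String :=
  ((graph.find? (fun p => p.1 == node)).map (fun p => p.2)).getD []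

def getNeighbors (graph : List (String × List String)) (node : String) : List String :=
  let neighbors : PySem.Set String :=
    (pyDictGet graph node).foldl (fun s item => PySem.Set.add s item) PySem.Set.empty
  graph.foldl (fun s kv => if node ∈ kv.2 then PySem.Set.add s kv.1 else s) neighbors

-- all node names occurring in the graph (keys and values); termination universe of the loop
def allNodes (graph : List (String × List String)) : List String :=
  graph.foldr (fun kv acc => kv.1 :: (kv.2 ++ acc)) []

-- the next four lemmas are needed by the ports themselves (the `hU` bound that
-- makes the shared while-loop terminate), so they stay above the port definitions
lemma mem_neighFold (n x : String) (l : List (String × List String)) (s0 : PySem.Set String)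
    (hx : x ∈ l.foldl (fun s kv => if n ∈ kv.2 then PySem.Set.add s kv.1 else s) s0) :
    x ∈ s0 ∨ ∃ kv, kv ∈ l ∧ x = kv.1 := by
  induction l generalizing s0 with
  | nil => exact Or.inl hx
  | cons kv tl ih =>
    simp only [List.foldl_cons] at hx
    rcases ih _ hx with h | ⟨kv', h1, h2⟩
    · by_cases hc : n ∈ kv.2
      · simp only [hc, if_pos] at h
        rcases (PySem.Set.mem_add _ _ _).mp h with h | h
        · exact Or.inl h
        · exact Or.inr ⟨kv, List.mem_cons_self, h⟩
      · simp only [hc, if_neg, not_false_iff] at h; exact Or.inl h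
    · exact Or.inr ⟨kv', List.mem_cons_of_mem _ h1, h2⟩

lemma mem_allNodes (graph : List (String × List String)) (kv : String × List String)
    (hkv : kv ∈ graph) : kv.1 ∈ allNodes graph ∧ ∀ x ∈ kv.2, x ∈ allNodes graph := by
  induction graph with
  | nil => cases hkv
  | cons hd tl ih =>
    have hall : allNodes (hd :: tl) = hd.1 :: (hd.2 ++ allNodes tl) := rfl
    rcases List.mem_cons.mp hkv with h | h
    · subst h; constructor
      · simp [hall]
      · intro x hx; simp [hall, hx]
    · rcases ih h with ⟨h1, h2⟩
      constructor
      · simp [hall, h1]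
      · intro x hx; simp [hall, h2 x hx]

lemma getNeighbors_sub (graph : List (String × List String)) :
    ∀ n, ∀ x ∈ getNeighbors graph n, x ∈ allNodes graph := by
  intro n x hx
  unfold getNeighbors at hx
  rcases mem_neighFold n x graph _ hx with h | ⟨kv, h1, h2⟩
  · -- x came from the first loop, i.e. from graph.get(n, [])
    have h' := (PySem.Set.mem_foldl_add (pyDictGet graph n) (fun b : String => b) PySem.Set.empty x).mp h
    rcases h' with h'' | ⟨b, hb, hxb⟩
    · cases h''
    · have hxb' : x = b := hxb
      subst hxb'
      unfold pyDictGet at hb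
      cases hfind : graph.find? (fun p => p.1 == n) with
      | none => rw [hfind] at hb; cases hb
      | some p =>
        rw [hfind] at hb
        exact (mem_allNodes graph p (List.mem_of_find?_eq_some hfind)).2 x hb
  · subst h2; exact (mem_allNodes graph kv h1).1

lemma dict_getD_sub (d : PySem.Dict String (List String)) :
    ∀ n, ∀ x ∈ d.getD n [], x ∈ d.values.flatten := by
  intro n x hx
  simp only [PySem.Dict.getD, PySem.Dict.get?] at hx
  cases hfind : d.items.find? (fun p => p.1 == n) with
  | none => rw [hfind] at hx; cases hx
  | some p =>
    rw [hfind] at hx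
    simp only [Option.map_some, Option.getD_some] at hx
    simp only [PySem.Dict.values, List.mem_flatten]
    exact ⟨p.2, List.mem_map_of_mem (List.mem_of_find?_eq_some hfind), hx⟩

-- the while-loop of both Pythons (they are textually identical up to the source of
-- the neighbour list `nbr`); `U`/`hU` only bound the values `nbr` can produce, for termination
def dfsLoop (nbr : String → List String) (U : List String)
    (hU : ∀ n, ∀ x ∈ nbr n, x ∈ U)
    (visited : PySem.Set String) (stack : List String) : Int :=
  if h : stack = [] then PySem.Set.len visited
  else
    let node := stack.getLast h
    let rest := stack.dropLast
    if node ∈ visited then dfsLoop nbr U hU visited rest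
    else dfsLoop nbr U hU (PySem.Set.add visited node) (rest ++ nbr node)
termination_by (((U.toFinset ∪ stack.toFinset) \ visited.toFinset).card, stack.length)
decreasing_by
  · have hsub : stack.dropLast.toFinset ⊆ stack.toFinset := by
      intro y hy
      rw [List.mem_toFinset] at *
      exact (List.dropLast_sublist stack).subset hy
    have hcard : (((U.toFinset ∪ stack.dropLast.toFinset) \ visited.toFinset).card)
        ≤ ((U.toFinset ∪ stack.toFinset) \ visited.toFinset).card := by
      apply Finset.card_le_card
      exact Finset.sdiff_subset_sdiff (Finset.union_subset_union_right hsub) (Finset.Subset.refl _)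
    rcases lt_or_eq_of_le hcard with h1 | h1
    · exact Prod.Lex.left _ _ h1
    · rw [h1]
      apply Prod.Lex.right
      have : stack.length ≠ 0 := fun hc => h (List.length_eq_zero_iff.mp hc)
      simp only [List.length_dropLast]
      omega
  · apply Prod.Lex.left
    apply Finset.card_lt_card
    constructor
    · intro y hy
      simp only [Finset.mem_sdiff, Finset.mem_union, List.mem_toFinset] at *
      rcases hy with ⟨hy1, hy2⟩
      have hyv : y ∈ visited ∨ y = stack.getLast h → False := by
        intro hc; exact hy2 ((PySem.Set.mem_add _ _ _).mpr hc)
      refine ⟨?_, fun hc => hyv (Or.inl hc)⟩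
      rcases hy1 with hy1 | hy1
      · exact Or.inl hy1
      · rcases List.mem_append.mp hy1 with hy1 | hy1
        · exact Or.inr ((List.dropLast_sublist stack).subset hy1)
        · exact Or.inl (hU _ y hy1)
    · intro hc
      have hnode : stack.getLast h ∈ (U.toFinset ∪ stack.toFinset) \ visited.toFinset := by
        simp only [Finset.mem_sdiff, Finset.mem_union, List.mem_toFinset]
        exact ⟨Or.inr (List.getLast_mem h), by assumption⟩
      have := hc hnode
      simp only [Finset.mem_sdiff, List.mem_toFinset] at this
      exact this.2 ((PySem.Set.mem_add _ _ _).mpr (Or.inr rfl))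

def dfs (graph : List (String × List String)) (start : String) : Int :=
  dfsLoop (fun node => getNeighbors graph node) (allNodes graph)
    (getNeighbors_sub graph) PySem.Set.empty [start]

-- ===== PORT B =====
-- rev: for each key, append it (once per pair) to rev[v] for every distinct v in its value list
def revOf (graph : List (String × List String)) : PySem.Dict String (List String) :=
  graph.foldl (fun r kv =>
    (PySem.List.dedup kv.2).foldl (fun r2 v => r2.modify v [] (fun l => l ++ [kv.1])) r)
    PySem.Dict.empty

-- adj[node] = dedup(graph[node] + rev.get(node, [])) for keys; then the remaining rev keys
def adjOf (graph : List (String × List String)) : PySem.Dict String (List String) :=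
  let rev := revOf graph
  let adj := (graph.map Prod.fst).foldl (fun a node =>
      a.insert node (PySem.List.dedup (pyDictGet graph node ++ rev.getD node []))) PySem.Dict.empty
  rev.keys.foldl (fun a node =>
      if a.contains node then a else a.insert node (PySem.List.dedup (rev.getD node []))) adj

def dfs_alt (graph : List (String × List String)) (start : String) : Int :=
  dfsLoop (fun node => (adjOf graph).getD node []) ((adjOf graph).values.flatten)
    (dict_getD_sub (adjOf graph)) PySem.Set.empty [start]

-- ===== PRECONDITION & SPEC =====
def Spec_dfs (graph : List (String × List String)) (start : String) (out : Int) : Prop := out = dfs_alt graph start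
instance (graph : List (String × List String)) (start : String) (out : Int) : Decidable (Spec_dfs graph start out) := by unfold Spec_dfs; infer_instance

-- ===== CLAIM (what is proved, stated in full; the proofs are below) =====
def Claim_equal_dfs : Prop := ∀ (graph : List (String × List String)) (start : String), Dom_dfs graph start → Spec_dfs graph start (dfs graph start)

-- ===== LEMMAS AND PROOFS =====

-- the keys adjacent to n through some pair (key, values) with n ∈ values, in pair order
def revL (graph : List (String × List String)) (n : String) : List String :=
  graph.flatMap (fun kv => if n ∈ kv.2 then [kv.1] else [])

lemma rev_inner (vs : List String) (k n : String) (r : PySem.Dict String (List String)) :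
    (vs.foldl (fun r2 v => r2.modify v [] (fun l => l ++ [k])) r).getD n []
      = r.getD n [] ++ List.replicate (vs.count n) k := by
  induction vs generalizing r with
  | nil => simp
  | cons v tl ih =>
    simp only [List.foldl_cons]
    rw [ih, PySem.Dict.getD_modify]
    by_cases hv : n = v
    · subst hv
      simp [List.replicate_succ]
    · simp [hv, Ne.symm hv]

lemma rev_getD_aux (graph : List (String × List String)) (n : String) :
    ∀ r : PySem.Dict String (List String),
    (graph.foldl (fun r kv =>
        (PySem.List.dedup kv.2).foldl (fun r2 v => r2.modify v [] (fun l => l ++ [kv.1])) r) r).getD n []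
      = r.getD n [] ++ revL graph n := by
  induction graph with
  | nil => simp [revL]
  | cons kv tl ih =>
    intro r
    simp only [List.foldl_cons]
    rw [ih, rev_inner]
    by_cases hm : n ∈ kv.2
    · have hmem : n ∈ PySem.List.dedup kv.2 := (PySem.List.mem_dedup _ _).mpr hm
      rw [List.count_eq_one_of_mem (PySem.List.nodup_dedup kv.2) hmem]
      simp [revL, hm]
    · have hmem : n ∉ PySem.List.dedup kv.2 := fun hc => hm ((PySem.List.mem_dedup _ _).mp hc)
      rw [List.count_eq_zero_of_not_mem hmem]
      simp [revL, hm]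

lemma rev_getD (graph : List (String × List String)) (n : String) :
    (revOf graph).getD n [] = revL graph n := by
  unfold revOf
  rw [rev_getD_aux]
  simp

lemma insFold_getD (l : List String) (F : String → List String) (n : String) :
    ∀ a0 : PySem.Dict String (List String),
    (l.foldl (fun a k => a.insert k (F k)) a0).getD n []
      = if n ∈ l then F n else a0.getD n [] := by
  induction l with
  | nil => intro a0; simp
  | cons k tl ih =>
    intro a0
    simp only [List.foldl_cons]
    rw [ih]
    by_cases h1 : n ∈ tl
    · simp [h1]
    · rw [PySem.Dict.getD_insert]
      by_cases h2 : n = k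
      · subst h2; simp [h1]
      · simp [h1, h2, List.mem_cons]

lemma insFold_contains (l : List String) (F : String → List String) (n : String) :
    ∀ a0 : PySem.Dict String (List String),
    ((l.foldl (fun a k => a.insert k (F k)) a0).contains n) = true
      ↔ n ∈ l ∨ a0.contains n = true := by
  induction l with
  | nil => intro a0; simp
  | cons k tl ih =>
    intro a0
    simp only [List.foldl_cons]
    rw [ih, PySem.Dict.contains_insert]
    by_cases h2 : n = k
    · subst h2; simp
    · have hb : (n == k) = false := by simp [h2]
      simp [hb, h2, List.mem_cons]

lemma skipFold_getD (l : List String) (G : String → List String) (n : String) :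
    ∀ a0 : PySem.Dict String (List String),
    (l.foldl (fun a k => if a.contains k then a else a.insert k (G k)) a0).getD n []
      = if a0.contains n then a0.getD n []
        else if n ∈ l then G n else a0.getD n [] := by
  induction l with
  | nil => intro a0; split <;> rfl
  | cons k tl ih =>
    intro a0
    simp only [List.foldl_cons]
    by_cases hc : a0.contains k
    · rw [if_pos hc, ih]
      by_cases hn : a0.contains n
      · simp [hn]
      · by_cases hnk : n = k
        · exact absurd (hnk ▸ hc) hn
        · simp [hn, hnk, List.mem_cons]
    · rw [if_neg hc, ih]
      by_cases hnk : n = k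
      · subst hnk
        simp [hc, List.mem_cons]
      · rw [PySem.Dict.contains_insert, PySem.Dict.getD_insert]
        have hb : (n == k) = false := by simp [hnk]
        simp [hb, hnk, List.mem_cons]

lemma pyDictGet_of_not_key (graph : List (String × List String)) (n : String)
    (h : n ∉ graph.map Prod.fst) : pyDictGet graph n = [] := by
  unfold pyDictGet
  have : graph.find? (fun p => p.1 == n) = none := by
    rw [List.find?_eq_none]
    intro p hp
    simp only [beq_iff_eq]
    intro hc
    exact h (hc ▸ List.mem_map_of_mem hp)
  rw [this]; rfl

lemma adj_getD (graph : List (String × List String)) (n : String) :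
    (adjOf graph).getD n [] = PySem.List.dedup (pyDictGet graph n ++ revL graph n) := by
  unfold adjOf
  rw [skipFold_getD, insFold_getD]
  have hget : (PySem.Dict.empty : PySem.Dict String (List String)).getD n [] = [] := by
    simp [PySem.Dict.getD, PySem.Dict.get?, PySem.Dict.empty]
  have hce : (PySem.Dict.empty : PySem.Dict String (List String)).contains n = false :=
    PySem.Dict.contains_empty n
  by_cases h1 : n ∈ graph.map Prod.fst
  · simp [insFold_contains, h1, rev_getD]
  · have hkey : pyDictGet graph n = [] := pyDictGet_of_not_key graph n h1
    simp only [insFold_contains, h1, hce, Bool.false_eq_true, or_false, if_false, hget]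
    by_cases h2 : n ∈ (revOf graph).keys
    · simp [h2, rev_getD, hkey]
    · have hc : (revOf graph).contains n = false := by
        rcases Bool.eq_false_or_eq_true ((revOf graph).contains n) with h | h
        · exact absurd ((PySem.Dict.contains_iff_mem_keys _ _).mp h) h2
        · exact h
      have hr : (revOf graph).getD n [] = [] := by
        simp [PySem.Dict.getD, (PySem.Dict.get?_eq_none_iff_contains _ n).mpr hc]
      have hrl : revL graph n = [] := by rw [← rev_getD graph n]; exact hr
      simp [h2, hkey, hrl, PySem.List.dedup]

lemma neighFold_update (n : String) (l : List (String × List String)) :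
    ∀ s : PySem.Set String,
    l.foldl (fun s kv => if n ∈ kv.2 then PySem.Set.add s kv.1 else s) s
      = PySem.Set.update s (revL l n) := by
  induction l with
  | nil => intro s; simp [revL, PySem.Set.update]
  | cons kv tl ih =>
    intro s
    simp only [List.foldl_cons, revL, List.flatMap_cons]
    by_cases hm : n ∈ kv.2
    · simp only [hm, if_pos]
      rw [ih]
      rfl
    · simp only [hm, if_neg, not_false_iff]
      rw [ih]
      rfl

lemma getNeighbors_eq (graph : List (String × List String)) (n : String) :
    getNeighbors graph n = PySem.List.dedup (pyDictGet graph n ++ revL graph n) := by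
  unfold getNeighbors
  rw [neighFold_update, PySem.List.dedup_eq_ofList, PySem.Set.ofList_append]
  rfl

lemma dfsLoop_congr (nbr1 nbr2 : String → List String) (U1 U2 : List String)
    (h1 : ∀ n, ∀ x ∈ nbr1 n, x ∈ U1) (h2 : ∀ n, ∀ x ∈ nbr2 n, x ∈ U2)
    (hn : ∀ n, nbr1 n = nbr2 n) (visited : PySem.Set String) (stack : List String) :
    dfsLoop nbr1 U1 h1 visited stack = dfsLoop nbr2 U2 h2 visited stack := by
  induction visited, stack using dfsLoop.induct nbr1 U1 h1 with
  | case1 visited => rw [dfsLoop, dfsLoop]; simp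
  | case2 visited stack h node rest hv ih =>
    rw [dfsLoop, dfsLoop]
    simp only [h, dif_neg, not_false_iff]
    split_ifs with hvv
    · exact ih
    · exact absurd hv hvv
  | case3 visited stack h node rest hv ih =>
    rw [dfsLoop, dfsLoop]
    simp only [h, dif_neg, not_false_iff]
    split_ifs with hvv
    · exact absurd hvv hv
    · rw [hn (stack.getLast h)] at ih
      rw [hn (stack.getLast h)]
      exact ih

-- ===== VERDICT (by name: the statement is the Claim_ definition above) =====
theorem dfs_spec : Claim_equal_dfs := by
  intro graph start _
  unfold Spec_dfs dfs dfs_alt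
  apply dfsLoop_congr
  intro n
  rw [getNeighbors_eq, adj_getD]
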